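-- pv_equiv track=rewrite | github.com/RolandGoud/bikescaper | trek_bikes_scraper.py | determine_framefit
-- ===== SOURCE A (Python) =====
-- def determine_framefit(bike_info):
--     """Determine framefit based on bike name and category"""
--     bike_name = bike_info.get('name', '').lower()
--     category = bike_info.get('category', '').lower()
--
--     # Endurance bikes
--     if any(series in bike_name for series in ['domane', 'checkpoint']):
--         return 'Endurance'
--
--     # Race bikes
--     if any(series in bike_name for series in ['madone', 'émonda']):
--         return 'H1.5 Race'
--
--     # Triathlon bikes
--     if 'speed concept' in bike_name:
--         return 'Triatlon'
--
--     # Cyclocross bikes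
--     if 'boone' in bike_name:
--         return 'H1.5 Race'
--
--     # Fitness bikes
--     if 'fx' in bike_name:
--         return 'Comfort'
--
--     # Default based on category
--     if 'performance' in category:
--         return 'H1.5 Race'
--     elif 'gravel' in category or 'cyclocross' in category:
--         return 'Endurance'
--     elif 'fitness' in category:
--         return 'Comfort'
--     elif 'triathlon' in category:
--         return 'Triatlon'
--
--     return None
-- ===== SOURCE B (Python) =====
-- # One flat prioritized keyword table searched over both fields; the answer is the
-- # label of the minimum-priority matching entry (instead of an ordered early-return scan).
-- RULES = [
--     (0, 'domane', 'name', 'Endurance'),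
--     (0, 'checkpoint', 'name', 'Endurance'),
--     (1, 'madone', 'name', 'H1.5 Race'),
--     (1, 'émonda', 'name', 'H1.5 Race'),
--     (2, 'speed concept', 'name', 'Triatlon'),
--     (3, 'boone', 'name', 'H1.5 Race'),
--     (4, 'fx', 'name', 'Comfort'),
--     (5, 'performance', 'category', 'H1.5 Race'),
--     (6, 'gravel', 'category', 'Endurance'),
--     (6, 'cyclocross', 'category', 'Endurance'),
--     (7, 'fitness', 'category', 'Comfort'),
--     (8, 'triathlon', 'category', 'Triatlon'),
-- ]
--
--
-- def determine_framefit(bike_info):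
--     """Determine framefit based on bike name and category"""
--     texts = {
--         'name': bike_info.get('name', '').lower(),
--         'category': bike_info.get('category', '').lower(),
--     }
--     matched = [(prio, label) for prio, kw, field, label in RULES if kw in texts[field]]
--     if not matched:
--         return None
--     return min(matched, key=lambda m: m[0])[1]
-- ===== Notes on version B (the rewrite author's own statement) =====
-- stated objective: alternative
-- what changed: Replaced A's ordered early-return if-cascade by one flat prioritized keyword table: B filters it into the list of all matching (priority, label) entries over both fields at once and returns the label of the minimum-priority match.
import Mathlib
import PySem

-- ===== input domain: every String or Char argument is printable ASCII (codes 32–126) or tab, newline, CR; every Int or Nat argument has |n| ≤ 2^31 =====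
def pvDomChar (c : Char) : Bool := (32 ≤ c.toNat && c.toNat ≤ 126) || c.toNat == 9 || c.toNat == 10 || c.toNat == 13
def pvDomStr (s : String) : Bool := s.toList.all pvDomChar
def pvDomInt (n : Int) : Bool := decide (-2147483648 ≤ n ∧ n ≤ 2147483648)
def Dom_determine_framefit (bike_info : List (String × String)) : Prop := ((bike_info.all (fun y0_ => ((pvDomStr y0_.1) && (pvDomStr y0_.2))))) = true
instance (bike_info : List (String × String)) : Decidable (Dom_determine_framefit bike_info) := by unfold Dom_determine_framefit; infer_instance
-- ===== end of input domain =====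

-- B replaces A's ordered if-cascade by one flat prioritized keyword table filtered
-- into a match list whose minimum-priority entry gives the answer (objective: alternative).

-- ===== PORT A =====
def determine_framefit (bike_info : List (String × String)) : Option String :=
  let d := PySem.Dict.ofList bike_info
  let bike_name := PySem.Str.lower (d.getD "name" "")
  let category := PySem.Str.lower (d.getD "category" "")
  if ["domane", "checkpoint"].any (fun series => PySem.Str.isIn series bike_name) then
    some "Endurance"
  else if ["madone", "émonda"].any (fun series => PySem.Str.isIn series bike_name) then
    some "H1.5 Race"
  else if PySem.Str.isIn "speed concept" bike_name then
    some "Triatlon"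
  else if PySem.Str.isIn "boone" bike_name then
    some "H1.5 Race"
  else if PySem.Str.isIn "fx" bike_name then
    some "Comfort"
  else if PySem.Str.isIn "performance" category then
    some "H1.5 Race"
  else if PySem.Str.isIn "gravel" category || PySem.Str.isIn "cyclocross" category then
    some "Endurance"
  else if PySem.Str.isIn "fitness" category then
    some "Comfort"
  else if PySem.Str.isIn "triathlon" category then
    some "Triatlon"
  else
    none

-- ===== PORT B =====
def pvRules : List (Int × String × String × String) :=
  [(0, "domane", "name", "Endurance"),
   (0, "checkpoint", "name", "Endurance"),
   (1, "madone", "name", "H1.5 Race"),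
   (1, "émonda", "name", "H1.5 Race"),
   (2, "speed concept", "name", "Triatlon"),
   (3, "boone", "name", "H1.5 Race"),
   (4, "fx", "name", "Comfort"),
   (5, "performance", "category", "H1.5 Race"),
   (6, "gravel", "category", "Endurance"),
   (6, "cyclocross", "category", "Endurance"),
   (7, "fitness", "category", "Comfort"),
   (8, "triathlon", "category", "Triatlon")]

def determine_framefit_alt (bike_info : List (String × String)) : Option String :=
  let d := PySem.Dict.ofList bike_info
  let texts : PySem.Dict String String :=
    PySem.Dict.ofList
      [("name", PySem.Str.lower (d.getD "name" "")),
       ("category", PySem.Str.lower (d.getD "category" ""))]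
  let matched := pvRules.filterMap (fun r =>
    if PySem.Str.isIn r.2.1 (texts.getD r.2.2.1 "") then some (r.1, r.2.2.2) else none)
  match PySem.List.min? matched (fun m => m.1) with
  | none => none
  | some m => some m.2

-- ===== PRECONDITION & SPEC =====
def Spec_determine_framefit (bike_info : List (String × String)) (out : Option String) : Prop := out = determine_framefit_alt bike_info
instance (bike_info : List (String × String)) (out : Option String) : Decidable (Spec_determine_framefit bike_info out) := by unfold Spec_determine_framefit; infer_instance

-- ===== CLAIM =====
def Claim_equal_determine_framefit : Prop := ∀ (bike_info : List (String × String)), Dom_determine_framefit bike_info → Spec_determine_framefit bike_info (determine_framefit bike_info)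

-- ===== LEMMAS AND PROOFS =====
set_option maxHeartbeats 4000000 in
theorem framefit_key (b1 b2 b3 b4 b5 b6 b7 b8 b9 b10 b11 b12 : Bool) :
    (if b1 || b2 then some "Endurance"
     else if b3 || b4 then some "H1.5 Race"
     else if b5 then some "Triatlon"
     else if b6 then some "H1.5 Race"
     else if b7 then some "Comfort"
     else if b8 then some "H1.5 Race"
     else if b9 || b10 then some "Endurance"
     else if b11 then some "Comfort"
     else if b12 then some "Triatlon"
     else (none : Option String))
    = (match PySem.List.min?
          (List.filterMap (fun t : Bool × Int × String => if t.1 then some (t.2.1, t.2.2) else none)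
            [(b1, (0 : Int), "Endurance"), (b2, (0 : Int), "Endurance"), (b3, (1 : Int), "H1.5 Race"), (b4, (1 : Int), "H1.5 Race"), (b5, (2 : Int), "Triatlon"), (b6, (3 : Int), "H1.5 Race"), (b7, (4 : Int), "Comfort"), (b8, (5 : Int), "H1.5 Race"), (b9, (6 : Int), "Endurance"), (b10, (6 : Int), "Endurance"), (b11, (7 : Int), "Comfort"), (b12, (8 : Int), "Triatlon")])
          (fun m => m.1) with
       | none => none
       | some m => some m.2) := by
  revert b1 b2 b3 b4 b5 b6 b7 b8 b9 b10 b11 b12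
  decide

set_option maxHeartbeats 4000000 in
theorem framefit_eq (bike_info : List (String × String)) :
    determine_framefit bike_info = determine_framefit_alt bike_info := by
  unfold determine_framefit determine_framefit_alt
  have hn : ∀ n c : String, (PySem.Dict.ofList [("name", n), ("category", c)]).getD "name" "" = n := fun n c => rfl
  have hc : ∀ n c : String, (PySem.Dict.ofList [("name", n), ("category", c)]).getD "category" "" = c := fun n c => rfl
  have key := framefit_key
      (PySem.Str.isIn "domane" (PySem.Str.lower ((PySem.Dict.ofList bike_info).getD "name" "")))
      (PySem.Str.isIn "checkpoint" (PySem.Str.lower ((PySem.Dict.ofList bike_info).getD "name" "")))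
      (PySem.Str.isIn "madone" (PySem.Str.lower ((PySem.Dict.ofList bike_info).getD "name" "")))
      (PySem.Str.isIn "émonda" (PySem.Str.lower ((PySem.Dict.ofList bike_info).getD "name" "")))
      (PySem.Str.isIn "speed concept" (PySem.Str.lower ((PySem.Dict.ofList bike_info).getD "name" "")))
      (PySem.Str.isIn "boone" (PySem.Str.lower ((PySem.Dict.ofList bike_info).getD "name" "")))
      (PySem.Str.isIn "fx" (PySem.Str.lower ((PySem.Dict.ofList bike_info).getD "name" "")))
      (PySem.Str.isIn "performance" (PySem.Str.lower ((PySem.Dict.ofList bike_info).getD "category" "")))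
      (PySem.Str.isIn "gravel" (PySem.Str.lower ((PySem.Dict.ofList bike_info).getD "category" "")))
      (PySem.Str.isIn "cyclocross" (PySem.Str.lower ((PySem.Dict.ofList bike_info).getD "category" "")))
      (PySem.Str.isIn "fitness" (PySem.Str.lower ((PySem.Dict.ofList bike_info).getD "category" "")))
      (PySem.Str.isIn "triathlon" (PySem.Str.lower ((PySem.Dict.ofList bike_info).getD "category" "")))
  simp only [pvRules, List.filterMap_cons, List.filterMap_nil, List.any_cons, List.any_nil,
    Bool.or_false, hn, hc] at key ⊢
  exact key

-- ===== VERDICT =====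
theorem determine_framefit_spec : Claim_equal_determine_framefit := by
  intro bike_info _
  unfold Spec_determine_framefit
  exact framefit_eq bike_info
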